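-- pv_equiv track=rewrite | github.com/depthsecurity/armory | armory/included/utilities/get_urls.py | sort_by_url
-- ===== SOURCE A (Python) =====
-- def sort_by_url(data):
--     d_data = {}
--
--     for d in list(set(data)):
--         host = d.split("/")[2].split(":")[0]
--         scheme = d.split(":")[0]
--         port = d.split(":")[2]
--
--         if d_data.get(host, False):
--             d_data[host].append([port, scheme])
--         else:
--             d_data[host] = [[port, scheme]]
--
--     res = []
--
--     for d in sorted(d_data.keys()):
--         for s in sorted(d_data[d]):
--             res.append("%s://%s:%s" % (s[1], d, s[0]))
--
--     return res
-- ===== SOURCE B (Python) =====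
-- def sort_by_url(data):
--     triples = sorted(
--         (d.split("/")[2].split(":")[0], d.split(":")[2], d.split(":")[0])
--         for d in set(data)
--     )
--     return ["%s://%s:%s" % (scheme, host, port) for host, port, scheme in triples]
-- ===== Notes on version B (the rewrite author's own statement) =====
-- stated objective: simpler
-- what changed: Replaces the host-keyed grouping dict with its nested sorted-keys/sorted-group passes by one flat list of (host, port, scheme) tuples sorted once globally, then formatted in a single pass.
import Mathlib
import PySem

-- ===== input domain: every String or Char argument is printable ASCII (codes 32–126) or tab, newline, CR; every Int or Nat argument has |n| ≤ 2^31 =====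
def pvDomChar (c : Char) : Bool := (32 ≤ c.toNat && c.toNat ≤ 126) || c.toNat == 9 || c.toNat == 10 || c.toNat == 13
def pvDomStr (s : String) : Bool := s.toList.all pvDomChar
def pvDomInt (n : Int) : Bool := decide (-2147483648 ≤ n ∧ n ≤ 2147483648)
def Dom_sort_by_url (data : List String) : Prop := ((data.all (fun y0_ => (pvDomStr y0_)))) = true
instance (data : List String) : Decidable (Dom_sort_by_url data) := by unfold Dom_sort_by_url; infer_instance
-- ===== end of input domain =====

-- B replaces A's host-keyed grouping dict and its nested sorted-keys/sorted-group passes by one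
-- flat list of (host, port, scheme) tuples sorted once globally, then formatted in a single pass
-- (objective: simpler; same asymptotic cost).

-- shared field extractors: exactly the split expressions both Pythons write
-- d.split("/") / d.split(":") — sep is a nonempty literal, so Python's split never raises here
def pvSplit (d sep : String) : List String := (PySem.Str.split? d sep).getD []
-- d.split("/")[2].split(":")[0]
def pvHost (d : String) : String :=
  PySem.List.pyGetD (pvSplit (PySem.List.pyGetD (pvSplit d "/") 2 "") ":") 0 ""
-- d.split(":")[0]
def pvScheme (d : String) : String := PySem.List.pyGetD (pvSplit d ":") 0 ""
-- d.split(":")[2]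
def pvPort (d : String) : String := PySem.List.pyGetD (pvSplit d ":") 2 ""
-- "%s://%s:%s" % (scheme, host, port)
def pvFmt (scheme host port : String) : String := scheme ++ "://" ++ host ++ ":" ++ port

-- ===== PORT A =====
-- loop body of A's grouping loop: d_data.get(host, False) truthiness test, append or fresh list
def pvStepA (dd : PySem.Dict String (List (String × String))) (d : String) :
    PySem.Dict String (List (String × String)) :=
  let host := pvHost d
  let scheme := pvScheme d
  let port := pvPort d
  let cur := dd.getD host []
  if cur.isEmpty then dd.insert host [(port, scheme)]
  else dd.insert host (cur ++ [(port, scheme)])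

def sort_by_url (data : List String) : List String :=
  let d_data := (PySem.Set.ofList data).foldl pvStepA PySem.Dict.empty
  (PySem.List.sorted d_data.keys (fun x => x)).foldl
    (fun res h =>
      -- sorted(d_data[d]) sorts the [port, scheme] pairs lexicographically: sorted2 with both components
      (PySem.List.sorted2 (d_data.getD h []) (fun s => s.1) (fun s => s.2)).foldl
        (fun r s => r ++ [pvFmt s.2 h s.1]) res)
    []

-- ===== PORT B =====
-- Python's lexicographic comparison of the (host, port, scheme) tuples, as a sort key
def pvKey (t : String × String × String) : Lex (String × Lex (String × String)) :=
  toLex (t.1, toLex (t.2.1, t.2.2))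

def sort_by_url_alt (data : List String) : List String :=
  let triples := (PySem.Set.ofList data).map (fun d => (pvHost d, pvPort d, pvScheme d))
  (PySem.List.sorted triples pvKey).map (fun t => pvFmt t.2.2 t.1 t.2.1)

-- ===== PRECONDITION & SPEC =====
-- A raises IndexError on any element whose "/"-split has fewer than 3 parts or whose ":"-split
-- has fewer than 3 parts; Pre_ excludes exactly those inputs.
def Pre_sort_by_url (data : List String) : Prop :=
  ∀ d ∈ data, 3 ≤ (pvSplit d "/").length ∧ 3 ≤ (pvSplit d ":").length
instance (data : List String) : Decidable (Pre_sort_by_url data) := by unfold Pre_sort_by_url; infer_instance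

def pvWitness_sort_by_url : List String := ["http://a:1", "https://b:8080/x", "http://a:2"]

def Spec_sort_by_url (data : List String) (out : List String) : Prop := out = sort_by_url_alt data
instance (data : List String) (out : List String) : Decidable (Spec_sort_by_url data out) := by unfold Spec_sort_by_url; infer_instance

-- ===== CLAIM (what is proved, stated in full; the proofs are below) =====
def Claim_equal_sort_by_url : Prop := ∀ (data : List String), Dom_sort_by_url data → Pre_sort_by_url data → Spec_sort_by_url data (sort_by_url data)

-- ===== LEMMAS AND PROOFS =====

-- the tuple list B sorts (also the per-element payload of A's grouping loop)
def pvTriples (data : List String) : List (String × String × String) :=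
  (PySem.Set.ofList data).map (fun d => (pvHost d, pvPort d, pvScheme d))

theorem pvStepA_eq_modify (dd : PySem.Dict String (List (String × String))) (d : String) :
    pvStepA dd d = dd.modify (pvHost d) [] (fun v => v ++ [(pvPort d, pvScheme d)]) := by
  simp only [pvStepA, PySem.Dict.modify]
  by_cases hc : (dd.getD (pvHost d) []).isEmpty
  · simp [List.isEmpty_iff.mp hc]
  · simp [hc]

theorem pvDict_eq (data : List String) :
    (PySem.Set.ofList data).foldl pvStepA PySem.Dict.empty
      = (pvTriples data).foldl (fun dd p => dd.modify p.1 [] (fun v => v ++ [p.2])) PySem.Dict.empty := by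
  rw [pvTriples, List.foldl_map]
  have hstep : pvStepA = fun dd d => dd.modify (pvHost d) [] (fun v => v ++ [(pvPort d, pvScheme d)]) := by
    funext dd d; exact pvStepA_eq_modify dd d
  rw [hstep]

theorem pvDict_getD (data : List String) (h : String) :
    ((pvTriples data).foldl (fun dd p => dd.modify p.1 [] (fun v => v ++ [p.2])) PySem.Dict.empty).getD h []
      = ((pvTriples data).filter (fun p => p.1 == h)).map (fun p => p.2) := by
  rw [PySem.Dict.getD_foldl_modify_append]
  simp [PySem.Dict.getD_empty]

theorem pvDict_keys (data : List String) :
    ((pvTriples data).foldl (fun dd p => dd.modify p.1 [] (fun v => v ++ [p.2])) PySem.Dict.empty).keys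
      = PySem.Set.ofList ((pvTriples data).map (fun p => p.1)) := by
  rw [PySem.Dict.keys_foldl_modify_key (pvTriples data) (fun p => p.1) [] (fun _ p => (fun v => v ++ [p.2]))]
  rw [PySem.Dict.keys_empty, PySem.Set.update_nil_left]

theorem pvSorted2_eq_sorted_lex {α κ₁ κ₂ : Type} [LinearOrder κ₁] [LinearOrder κ₂]
    (xs : List α) (k1 : α → κ₁) (k2 : α → κ₂) :
    PySem.List.sorted2 xs k1 k2 = PySem.List.sorted xs (fun x => toLex (k1 x, k2 x)) := by
  rw [PySem.List.sorted_eq_foldl_insertBy]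
  unfold PySem.List.sorted2
  simp only []
  congr 1
  funext acc x
  congr 1
  funext a b
  rcases lt_trichotomy (k1 a) (k1 b) with h | h | h
  · simp [Prod.Lex.lt_iff, h, asymm h]
  · simp [Prod.Lex.lt_iff, h]
  · simp [Prod.Lex.lt_iff, h, asymm h, ne_of_gt h]

theorem pvKey_injective : Function.Injective pvKey := by
  intro p q h
  simp only [pvKey, toLex_inj, Prod.mk.injEq] at h
  obtain ⟨h1, h2, h3⟩ := h
  exact Prod.ext h1 (Prod.ext h2 h3)

theorem pvPartitionPerm {α κ : Type} [BEq κ] [LawfulBEq κ] (key : α → κ) :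
    ∀ (ks : List κ) (l : List α), ks.Nodup → (∀ p ∈ l, key p ∈ ks) →
      (ks.flatMap (fun k => l.filter (fun p => key p == k))).Perm l := by
  intro ks
  induction ks with
  | nil =>
    intro l _ hcov
    have : l = [] := by
      cases l with
      | nil => rfl
      | cons a t => exact absurd (hcov a (by simp)) (by simp)
    simp [this]
  | cons k ks ih =>
    intro l hnd hcov
    rw [List.flatMap_cons]
    have hknotin : k ∉ ks := (List.nodup_cons.mp hnd).1
    have hrw : ks.flatMap (fun k' => l.filter (fun p => key p == k'))
        = ks.flatMap (fun k' => (l.filter (fun p => !(key p == k))).filter (fun p => key p == k')) := by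
      apply List.flatMap_congr
      intro k' hk'
      rw [List.filter_filter]
      apply List.filter_congr
      intro p _
      by_cases h : key p == k'
      · have hne : ¬ (key p == k) = true := by
          simp only [beq_iff_eq] at h ⊢
          rintro rfl; exact hknotin (h ▸ hk')
        simp [h, hne]
      · simp [h]
    have htail : (ks.flatMap (fun k' => l.filter (fun p => key p == k'))).Perm
        (l.filter (fun p => !(key p == k))) := by
      rw [hrw]
      apply ih _ (List.nodup_cons.mp hnd).2
      intro p hp
      have hmem := List.mem_filter.mp hp
      have hc := hcov p hmem.1
      simp only [List.mem_cons] at hc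
      rcases hc with h | h
      · exfalso; have := hmem.2; simp [h] at this
      · exact h
    exact ((List.Perm.refl _).append htail).trans (List.filter_append_perm _ l)

theorem pvSortedFlat (l : List (String × String × String)) :
    PySem.List.sorted l pvKey
      = (PySem.List.sorted (PySem.Set.ofList (l.map (fun p => p.1))) (fun x => x)).flatMap
          (fun h => (PySem.List.sorted ((l.filter (fun p => p.1 == h)).map (fun p => p.2))
              (fun s => toLex (s.1, s.2))).map (fun s => (h, s))) := by
  have hgroup : ∀ h : String,
      (((l.filter (fun p => p.1 == h)).map (fun p => p.2)).map (fun s => ((h, s) : String × String × String)))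
        = l.filter (fun p => p.1 == h) := by
    intro h
    rw [List.map_map]
    refine (List.map_congr_left ?_).trans (List.map_id _)
    intro p hp
    have := (List.mem_filter.mp hp).2
    simp only [beq_iff_eq] at this
    simp only [Function.comp, id_eq, ← this]
  have permRHS : ((PySem.List.sorted (PySem.Set.ofList (l.map (fun p => p.1))) (fun x => x)).flatMap
          (fun h => (PySem.List.sorted ((l.filter (fun p => p.1 == h)).map (fun p => p.2))
              (fun s => toLex (s.1, s.2))).map (fun s => (h, s)))).Perm l := by
    have step1 : ∀ h ∈ PySem.List.sorted (PySem.Set.ofList (l.map (fun p => p.1))) (fun x => x),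
        ((PySem.List.sorted ((l.filter (fun p => p.1 == h)).map (fun p => p.2))
            (fun s => toLex (s.1, s.2))).map (fun s => ((h, s) : String × String × String))).Perm
          (l.filter (fun p => p.1 == h)) := by
      intro h _
      have := (PySem.List.sorted_perm ((l.filter (fun p => p.1 == h)).map (fun p => p.2))
        (fun s => toLex (s.1, s.2)) false).map (fun s => ((h, s) : String × String × String))
      rw [hgroup h] at this
      exact this
    refine (List.Perm.flatMap (List.Perm.refl _) step1).trans ?_
    refine (List.Perm.flatMap (PySem.List.sorted_perm _ _ false) (fun _ _ => List.Perm.refl _)).trans ?_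
    refine pvPartitionPerm (fun p : String × String × String => p.1) _ l (PySem.Set.nodup_ofList _) ?_
    intro p hp
    rw [PySem.Set.mem_ofList]
    exact List.mem_map.mpr ⟨p, hp, rfl⟩
  have pw2 : List.Pairwise (fun a b => pvKey a ≤ pvKey b)
      ((PySem.List.sorted (PySem.Set.ofList (l.map (fun p => p.1))) (fun x => x)).flatMap
          (fun h => (PySem.List.sorted ((l.filter (fun p => p.1 == h)).map (fun p => p.2))
              (fun s => toLex (s.1, s.2))).map (fun s => (h, s)))) := by
    rw [List.pairwise_flatMap]
    constructor
    · intro h _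
      rw [List.pairwise_map]
      apply (PySem.List.sorted_pairwise _ _).imp
      intro s s' hle
      simp only [pvKey]
      rw [Prod.Lex.le_iff]
      exact Or.inr ⟨rfl, by simpa using hle⟩
    · apply (PySem.List.sorted_ofList_pairwise_lt _).imp
      intro h h' hlt x hx y hy
      obtain ⟨s, _, rfl⟩ := List.mem_map.mp hx
      obtain ⟨s', _, rfl⟩ := List.mem_map.mp hy
      simp only [pvKey]
      rw [Prod.Lex.le_iff]
      exact Or.inl hlt
  exact PySem.List.eq_of_perm_of_pairwise_le_of_injective pvKey pvKey_injective
    ((PySem.List.sorted_perm _ _ false).trans permRHS.symm)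
    (PySem.List.sorted_pairwise _ _) pw2

-- ===== VERDICT (by name: the statement is the Claim_ definition above) =====
theorem sort_by_url_spec : Claim_equal_sort_by_url := by
  intro data _ _
  unfold Spec_sort_by_url sort_by_url sort_by_url_alt
  rw [show (PySem.Set.ofList data).map (fun d => (pvHost d, pvPort d, pvScheme d)) = pvTriples data from rfl]
  rw [pvDict_eq]
  simp only [pvDict_getD, pvDict_keys, pvSorted2_eq_sorted_lex]
  simp only [PySem.List.foldl_append_singleton_eq_map, PySem.List.foldl_append_eq_flatMap,
    List.nil_append]
  rw [pvSortedFlat]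
  simp only [List.map_flatMap, List.map_map, Function.comp_def]
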